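-- pv_equiv track=rewrite | github.com/maximgrigorov/midi-cleaner | processors/voice_merger.py | _align_chord_durations
-- ===== SOURCE A (Python) =====
-- from collections import Counter, defaultdict
--
-- def _align_chord_durations(note_pairs):
--     """Align durations of simultaneously-starting notes (chords).
--
--     Guitar Pro assigns notes to different voices when they start at the same
--     beat but have different durations. By aligning all chord-note durations to
--     the shortest note in the chord, all notes stay in Voice 1.
--
--     Uses the SHORTEST duration in each chord group to prevent bar overflow.
--     """
--     by_onset = defaultdict(list)
--     for note in note_pairs:
--         by_onset[note['onset']].append(note)
--
--     result = []
--     for onset, notes in sorted(by_onset.items()):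
--         if len(notes) > 1:
--             # Check if there are actually different durations
--             durations = [n['offset'] - n['onset'] for n in notes]
--             if len(set(durations)) > 1:
--                 # Use shortest duration for all notes in chord
--                 shortest = min(durations)
--                 for note in notes:
--                     note['offset'] = note['onset'] + shortest
--         result.extend(notes)
--
--     result.sort(key=lambda n: (n['onset'], n['pitch']))
--     return result
-- ===== SOURCE B (Python) =====
-- def _align_chord_durations(note_pairs):
--     """Single stable sort by (onset, pitch), then one linear pass over
--     consecutive equal-onset runs, aligning offsets to the shortest duration."""
--     out = sorted(note_pairs, key=lambda n: (n['onset'], n['pitch']))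
--     i = 0
--     while i < len(out):
--         j = i + 1
--         while j < len(out) and out[j]['onset'] == out[i]['onset']:
--             j += 1
--         if j - i > 1:
--             durations = {n['offset'] - n['onset'] for n in out[i:j]}
--             if len(durations) > 1:
--                 shortest = min(durations)
--                 for n in out[i:j]:
--                     n['offset'] = n['onset'] + shortest
--         i = j
--     return out
-- ===== Notes on version B (the rewrite author's own statement) =====
-- stated objective: alternative
-- what changed: Replaced the defaultdict grouping plus two sorts by a single stable sort on (onset, pitch) followed by one linear pass over consecutive equal-onset runs that aligns offsets in place.
import Mathlib
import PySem

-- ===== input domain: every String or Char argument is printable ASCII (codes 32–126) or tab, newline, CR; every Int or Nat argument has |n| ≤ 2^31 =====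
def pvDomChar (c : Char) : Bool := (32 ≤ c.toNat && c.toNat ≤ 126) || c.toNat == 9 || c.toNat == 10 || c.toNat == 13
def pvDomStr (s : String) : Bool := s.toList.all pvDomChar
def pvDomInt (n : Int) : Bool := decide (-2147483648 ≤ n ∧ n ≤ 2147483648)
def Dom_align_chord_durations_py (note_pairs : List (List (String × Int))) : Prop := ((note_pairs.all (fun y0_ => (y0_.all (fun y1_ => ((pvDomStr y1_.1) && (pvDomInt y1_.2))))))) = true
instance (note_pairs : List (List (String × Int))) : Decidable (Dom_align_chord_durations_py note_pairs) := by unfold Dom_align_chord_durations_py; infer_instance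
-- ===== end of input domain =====

-- ===== PORT A =====
-- B does the same in-place offset mutation of the note dicts as A; the equivalence proved here is about the return value.
def align_chord_durations_py (note_pairs : List (List (String × Int))) : List (List (String × Int)) :=
  -- by_onset = defaultdict(list); for note in note_pairs: by_onset[note['onset']].append(note)
  let by_onset : PySem.Dict Int (List (List (String × Int))) :=
    note_pairs.foldl (fun d note =>
      d.modify ((PySem.Dict.mk note).getD "onset" 0) [] (fun g => g ++ [note])) PySem.Dict.empty
  -- sorted(by_onset.items()): the onset keys are pairwise distinct, so Python's tuple
  -- comparison never reaches the second component — sorting by the key alone is exact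
  let result :=
    (PySem.List.sorted by_onset.items (fun p => p.1) false).foldl (fun result p =>
      let notes := p.2
      let notes :=
        if notes.length > 1 then
          let durations := notes.map (fun n =>
            (PySem.Dict.mk n).getD "offset" 0 - (PySem.Dict.mk n).getD "onset" 0)
          if (PySem.Set.ofList durations).length > 1 then
            let shortest := (PySem.List.min? durations (fun x => x)).getD 0
            notes.map (fun note =>
              ((PySem.Dict.mk note).insert "offset"
                ((PySem.Dict.mk note).getD "onset" 0 + shortest)).items)
          else notes
        else notes
      result ++ notes) []
  PySem.List.sorted2 result
    (fun n => (PySem.Dict.mk n).getD "onset" 0)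
    (fun n => (PySem.Dict.mk n).getD "pitch" 0) false

-- ===== PORT B =====
def alignB_onset (n : List (String × Int)) : Int := (PySem.Dict.mk n).getD "onset" 0
def alignB_pitch (n : List (String × Int)) : Int := (PySem.Dict.mk n).getD "pitch" 0
def alignB_dur (n : List (String × Int)) : Int := (PySem.Dict.mk n).getD "offset" 0 - alignB_onset n

-- body of the run-processing step (the 'if j - i > 1: …' block of Source B)
def alignB_fix (group : List (List (String × Int))) : List (List (String × Int)) :=
  if group.length > 1 then
    let durations := PySem.Set.ofList (group.map alignB_dur)
    if durations.length > 1 then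
      let shortest := (PySem.List.min? durations (fun x => x)).getD 0
      group.map (fun n => ((PySem.Dict.mk n).insert "offset" (alignB_onset n + shortest)).items)
    else group
  else group

-- the outer while loop of Source B: peel off one maximal run of equal onsets per step
def alignB_walk : List (List (String × Int)) → List (List (String × Int))
  | [] => []
  | n :: rest =>
    alignB_fix (n :: rest.takeWhile (fun m => alignB_onset m == alignB_onset n)) ++
      alignB_walk (rest.dropWhile (fun m => alignB_onset m == alignB_onset n))
termination_by l => l.length
decreasing_by
  simp only [List.length_cons]
  exact Nat.lt_succ_of_le (List.length_dropWhile_le _ _)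

def align_chord_durations_py_alt (note_pairs : List (List (String × Int))) : List (List (String × Int)) :=
  alignB_walk (PySem.List.sorted2 note_pairs alignB_onset alignB_pitch false)

-- ===== PRECONDITION & SPEC =====
-- Pre_: exactly the inputs where Python A returns (no KeyError): every note has 'onset' and
-- 'pitch'; 'offset' is only read for notes whose onset is shared by more than one note.
def Pre_align_chord_durations_py (note_pairs : List (List (String × Int))) : Prop :=
  ∀ n ∈ note_pairs,
    (PySem.Dict.mk n).contains "onset" = true ∧ (PySem.Dict.mk n).contains "pitch" = true ∧
    ((note_pairs.filter (fun m =>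
        (PySem.Dict.mk m).getD "onset" 0 == (PySem.Dict.mk n).getD "onset" 0)).length > 1 →
      (PySem.Dict.mk n).contains "offset" = true)
instance (note_pairs : List (List (String × Int))) : Decidable (Pre_align_chord_durations_py note_pairs) := by
  unfold Pre_align_chord_durations_py; infer_instance
def pvWitness_align_chord_durations_py : (List (List (String × Int))) :=
  [[("onset", 0), ("offset", 4), ("pitch", 60)], [("onset", 0), ("offset", 2), ("pitch", 55)],
   [("onset", 4), ("offset", 6), ("pitch", 60)]]
def Spec_align_chord_durations_py (note_pairs : List (List (String × Int))) (out : List (List (String × Int))) : Prop := out = align_chord_durations_py_alt note_pairs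
instance (note_pairs : List (List (String × Int))) (out : List (List (String × Int))) : Decidable (Spec_align_chord_durations_py note_pairs out) := by unfold Spec_align_chord_durations_py; infer_instance

-- ===== CLAIM (what is proved, stated in full; the proofs are below) =====
def Claim_equal_align_chord_durations_py : Prop := ∀ (note_pairs : List (List (String × Int))), Dom_align_chord_durations_py note_pairs → Pre_align_chord_durations_py note_pairs → Spec_align_chord_durations_py note_pairs (align_chord_durations_py note_pairs)

-- ===== LEMMAS AND PROOFS =====

-- proof-side abbreviations: the lexicographic comparator of sorted2, onset groups,
-- the sorted distinct onsets, and the pointwise per-note transform F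

def pvLt {α : Type} (k1 k2 : α → Int) (a b : α) : Bool :=
  decide (k1 a < k1 b) || (!decide (k1 b < k1 a) && decide (k2 a < k2 b))

def pvG (xs : List (List (String × Int))) (o : Int) : List (List (String × Int)) :=
  xs.filter (fun n => alignB_onset n == o)

def pvOns (xs : List (List (String × Int))) : List Int :=
  PySem.List.sorted (PySem.Set.ofList (xs.map alignB_onset)) (fun x => x) false

def pvB (xs : List (List (String × Int))) (o : Int) : List (List (String × Int)) :=
  PySem.List.sorted (pvG xs o) alignB_pitch false

def pvMin (g : List (List (String × Int))) : Int :=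
  (PySem.List.min? (PySem.Set.ofList (g.map alignB_dur)) (fun x => x)).getD 0

def pvF (xs : List (List (String × Int))) (n : List (String × Int)) : List (String × Int) :=
  if 1 < (pvG xs (alignB_onset n)).length ∧
     1 < (PySem.Set.ofList ((pvG xs (alignB_onset n)).map alignB_dur)).length then
    ((PySem.Dict.mk n).insert "offset" (alignB_onset n + pvMin (pvG xs (alignB_onset n)))).items
  else n

theorem pv_sorted2_eq {α : Type} (xs : List α) (k1 k2 : α → Int) :
    PySem.List.sorted2 xs k1 k2 false =
      xs.foldl (fun acc x => PySem.List.insertBy (pvLt k1 k2) x acc) [] := rfl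

-- small insertBy facts
theorem pv_insertBy_cons {α : Type} (before : α → α → Bool) (x a : α) (l : List α) :
    PySem.List.insertBy before x (a :: l) =
      if before x a then x :: a :: l else a :: PySem.List.insertBy before x l := rfl

theorem pv_insertBy_front {α : Type} (before : α → α → Bool) (x : α) (l : List α)
    (h : ∀ y ∈ l, before x y = true) :
    PySem.List.insertBy before x l = x :: l := by
  cases l with
  | nil => rfl
  | cons y t =>
    show (if before x y then x :: y :: t else y :: PySem.List.insertBy before x t) = _
    rw [h y (by simp)]; simp


theorem pv_insertBy_skip {α : Type} (before : α → α → Bool) (x : α) (as bs : List α)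
    (h : ∀ y ∈ as, before x y = false) :
    PySem.List.insertBy before x (as ++ bs) = as ++ PySem.List.insertBy before x bs := by
  induction as with
  | nil => simp
  | cons a t ih =>
    show (if before x a then _ else a :: PySem.List.insertBy before x (t ++ bs)) = _
    rw [h a (by simp), ih (fun y hy => h y (by simp [hy]))]; simp


theorem pv_insertBy_stop {α : Type} (before : α → α → Bool) (x : α) (as bs : List α)
    (h : ∀ y ∈ bs, before x y = true) :
    PySem.List.insertBy before x (as ++ bs) = PySem.List.insertBy before x as ++ bs := by
  induction as with
  | nil =>
    cases bs with
    | nil => rfl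
    | cons b t =>
      simp only [List.nil_append, pv_insertBy_cons, h b (by simp), if_true]
      rfl
  | cons a t ih =>
    simp only [List.cons_append, pv_insertBy_cons]
    by_cases hb : before x a = true
    · simp [hb]
    · simp [hb, ih]

theorem pv_insertBy_congr {α : Type} (b1 b2 : α → α → Bool) (x : α) (l : List α)
    (h : ∀ y ∈ l, b1 x y = b2 x y) :
    PySem.List.insertBy b1 x l = PySem.List.insertBy b2 x l := by
  induction l with
  | nil => rfl
  | cons y t ih =>
    show (if b1 x y then _ else _) = (if b2 x y then _ else _)
    rw [h y (by simp), ih (fun y hy => h y (by simp [hy]))]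


theorem pv_insertBy_map {α β : Type} (f : α → β) (bb : β → β → Bool) (ba : α → α → Bool)
    (x : α) (l : List α) (h : ∀ a b, bb (f a) (f b) = ba a b) :
    PySem.List.insertBy bb (f x) (l.map f) = (PySem.List.insertBy ba x l).map f := by
  induction l with
  | nil => rfl
  | cons y t ih =>
    show (if bb (f x) (f y) then _ else _) = _
    rw [h x y]
    by_cases hxy : ba x y = true
    · simp [hxy, PySem.List.insertBy]
    · simp only [hxy, Bool.false_eq_true, if_false, PySem.List.insertBy, List.map_cons, ih]


-- a stable insertion sort commutes with a comparator-preserving map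
theorem pv_foldl_insertBy_map {α β : Type} (f : α → β) (bb : β → β → Bool) (ba : α → α → Bool)
    (h : ∀ a b, bb (f a) (f b) = ba a b) (l : List α) (init : List α) :
    (l.map f).foldl (fun acc x => PySem.List.insertBy bb x acc) (init.map f) =
      (l.foldl (fun acc x => PySem.List.insertBy ba x acc) init).map f := by
  induction l generalizing init with
  | nil => rfl
  | cons y t ih =>
    simp only [List.map_cons, List.foldl_cons]
    rw [pv_insertBy_map f bb ba y init h]
    exact ih _


-- takeWhile/dropWhile over a uniform block
theorem pv_takeWhile_all {α : Type} (p : α → Bool) (as bs : List α)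
    (h : ∀ y ∈ as, p y = true) :
    (as ++ bs).takeWhile p = as ++ bs.takeWhile p := by
  induction as with
  | nil => rfl
  | cons a t ih =>
    simp only [List.cons_append, List.takeWhile_cons, h a (by simp)]
    rw [ih (fun y hy => h y (by simp [hy]))]
    simp


theorem pv_takeWhile_none {α : Type} (p : α → Bool) (l : List α)
    (h : ∀ y ∈ l, p y = false) : l.takeWhile p = [] := by
  cases l with
  | nil => rfl
  | cons a t => simp [h a (by simp)]


theorem pv_dropWhile_all {α : Type} (p : α → Bool) (as bs : List α)
    (h : ∀ y ∈ as, p y = true) :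
    (as ++ bs).dropWhile p = bs.dropWhile p := by
  induction as with
  | nil => rfl
  | cons a t ih =>
    simp only [List.cons_append, List.dropWhile_cons, h a (by simp)]
    exact ih (fun y hy => h y (by simp [hy]))


theorem pv_dropWhile_none {α : Type} (p : α → Bool) (l : List α)
    (h : ∀ y ∈ l, p y = false) : l.dropWhile p = l := by
  cases l with
  | nil => rfl
  | cons a t => simp [h a (by simp)]


-- comparator facts for the lexicographic order
theorem pv_lt_true (x y : List (String × Int)) (h : alignB_onset x < alignB_onset y) :
    pvLt alignB_onset alignB_pitch x y = true := by
  simp [pvLt, h]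


theorem pv_lt_false (x y : List (String × Int)) (h : alignB_onset y < alignB_onset x) :
    pvLt alignB_onset alignB_pitch x y = false := by
  simp [pvLt]; omega


theorem pv_lt_eq (x y : List (String × Int)) (h : alignB_onset x = alignB_onset y) :
    pvLt alignB_onset alignB_pitch x y = decide (alignB_pitch x < alignB_pitch y) := by
  simp [pvLt, h]


-- inserting x into a concatenation of onset blocks: existing onset
theorem pv_ins1 (x : List (String × Int)) (Bf : Int → List (List (String × Int))) (os : List Int)
    (hso : os.Pairwise (· < ·))
    (hB : ∀ o ∈ os, ∀ y ∈ Bf o, alignB_onset y = o)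
    (hmem : alignB_onset x ∈ os) :
    PySem.List.insertBy (pvLt alignB_onset alignB_pitch) x (os.flatMap Bf) =
      os.flatMap (fun o => if o = alignB_onset x
        then PySem.List.insertBy (pvLt alignB_onset alignB_pitch) x (Bf o) else Bf o) := by
  induction os with
  | nil => cases hmem
  | cons o0 os' ih =>
    rw [List.pairwise_cons] at hso
    simp only [List.flatMap_cons]
    by_cases h0 : alignB_onset x = o0
    · have hrest : ∀ y ∈ os'.flatMap Bf, pvLt alignB_onset alignB_pitch x y = true := by
        intro y hy
        rw [List.mem_flatMap] at hy; obtain ⟨o, ho, hyo⟩ := hy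
        refine pv_lt_true x y ?_
        rw [hB o (by simp [ho]) y hyo, h0]
        exact hso.1 o ho
      rw [pv_insertBy_stop _ _ _ _ hrest, if_pos h0.symm]
      congr 1
      refine List.flatMap_congr (fun o ho => ?_)
      rw [if_neg]
      intro he
      exact absurd (he ▸ h0 ▸ hso.1 o ho) (lt_irrefl _)
    · have h0' : alignB_onset x ∈ os' := by
        rcases List.mem_cons.mp hmem with he | h'
        · exact absurd he h0
        · exact h'
      have hgt : o0 < alignB_onset x := hso.1 _ h0'
      have hskip : ∀ y ∈ Bf o0, pvLt alignB_onset alignB_pitch x y = false := by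
        intro y hy
        refine pv_lt_false x y ?_
        rw [hB o0 (by simp) y hy]; exact hgt
      rw [pv_insertBy_skip _ _ _ _ hskip,
        ih hso.2 (fun o ho => hB o (by simp [ho])) h0', if_neg (fun he => h0 he.symm)]


-- inserting x into a concatenation of onset blocks: new onset
theorem pv_ins2 (x : List (String × Int)) (Bf : Int → List (List (String × Int))) (os : List Int)
    (hso : os.Pairwise (· < ·))
    (hB : ∀ o ∈ os, ∀ y ∈ Bf o, alignB_onset y = o)
    (hne : ∀ o ∈ os, Bf o ≠ [])
    (hnot : alignB_onset x ∉ os) :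
    PySem.List.insertBy (pvLt alignB_onset alignB_pitch) x (os.flatMap Bf) =
      (PySem.List.insertBy (fun a b => decide (a < b)) (alignB_onset x) os).flatMap
        (fun o => if o = alignB_onset x then [x] else Bf o) := by
  induction os with
  | nil => simp [PySem.List.insertBy]
  | cons o0 os' ih =>
    rw [List.pairwise_cons] at hso
    simp only [List.flatMap_cons]
    by_cases hlt : alignB_onset x < o0
    · have hall : ∀ y ∈ Bf o0 ++ os'.flatMap Bf, pvLt alignB_onset alignB_pitch x y = true := by
        intro y hy
        rcases List.mem_append.mp hy with hy | hy
        · exact pv_lt_true x y (by rw [hB o0 (by simp) y hy]; exact hlt)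
        · rw [List.mem_flatMap] at hy; obtain ⟨o, ho, hyo⟩ := hy
          exact pv_lt_true x y
            (by rw [hB o (by simp [ho]) y hyo]; exact lt_trans hlt (hso.1 o ho))
      have hbl : ∀ o ∈ o0 :: os', (if o = alignB_onset x then [x] else Bf o) = Bf o := by
        intro o ho
        rw [if_neg]; intro he; rw [he] at ho; exact hnot ho
      rw [pv_insertBy_front _ _ _ hall, pv_insertBy_cons, if_pos (by simpa using hlt),
        List.flatMap_cons, List.flatMap_cons, if_pos rfl,
        hbl o0 (by simp), List.flatMap_congr (fun o ho => hbl o (by simp [ho]))]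
      simp
    · have h00 : o0 ≠ alignB_onset x := fun he => hnot (by simp [he])
      have hgt : o0 < alignB_onset x := by
        rcases lt_trichotomy o0 (alignB_onset x) with h | h | h
        · exact h
        · exact absurd h h00
        · exact absurd h hlt
      have hskip : ∀ y ∈ Bf o0, pvLt alignB_onset alignB_pitch x y = false := by
        intro y hy
        exact pv_lt_false x y (by rw [hB o0 (by simp) y hy]; exact hgt)
      rw [pv_insertBy_skip _ _ _ _ hskip, pv_insertBy_cons,
        if_neg (by simpa using not_lt_of_gt hgt),
        ih hso.2 (fun o ho => hB o (by simp [ho])) (fun o ho => hne o (by simp [ho]))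
          (fun h => hnot (by simp [h]))]
      simp only [List.flatMap_cons, if_neg h00]


-- membership facts
theorem pv_mem_pvOns (xs : List (List (String × Int))) (o : Int) :
    o ∈ pvOns xs ↔ o ∈ xs.map alignB_onset := by
  simp [pvOns, PySem.List.mem_sorted, PySem.Set.mem_ofList]


theorem pv_onset_of_mem_pvG (xs : List (List (String × Int))) (o : Int) (n : List (String × Int))
    (h : n ∈ pvG xs o) : alignB_onset n = o := by
  simp only [pvG, List.mem_filter, beq_iff_eq] at h
  exact h.2


theorem pv_pvB_onset (xs : List (List (String × Int))) (o : Int) (n : List (String × Int))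
    (h : n ∈ pvB xs o) : alignB_onset n = o := by
  rw [pvB, PySem.List.mem_sorted] at h
  exact pv_onset_of_mem_pvG xs o n h


theorem pv_pvB_ne_nil (xs : List (List (String × Int))) (o : Int) (h : o ∈ pvOns xs) :
    pvB xs o ≠ [] := by
  intro heq
  rw [pvB, PySem.List.sorted_eq_nil_iff] at heq
  rw [pv_mem_pvOns, List.mem_map] at h
  obtain ⟨n, hn, hno⟩ := h
  have : n ∈ pvG xs o := by simp [pvG, List.mem_filter, hn, hno]
  rw [heq] at this; exact absurd this (List.not_mem_nil)


theorem pv_onset_def (n : List (String × Int)) :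
    (PySem.Dict.mk n).getD "onset" 0 = alignB_onset n := rfl

theorem pv_pitch_def (n : List (String × Int)) :
    (PySem.Dict.mk n).getD "pitch" 0 = alignB_pitch n := rfl

theorem pv_dur_def (n : List (String × Int)) :
    (PySem.Dict.mk n).getD "offset" 0 - alignB_onset n = alignB_dur n := rfl

theorem pv_sorted_append_one {α κ : Type} [LT κ] [DecidableLT κ] (l : List α) (x : α) (key : α → κ) :
    PySem.List.sorted (l ++ [x]) key false =
      PySem.List.insertBy (fun a b => decide (key a < key b)) x (PySem.List.sorted l key false) := by
  rw [PySem.List.sorted_eq_foldl_insertBy, PySem.List.sorted_eq_foldl_insertBy, List.foldl_append]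
  rfl

theorem pv_ofList_append_one {α : Type} [BEq α] (l : List α) (x : α) :
    PySem.Set.ofList (l ++ [x]) = PySem.Set.add (PySem.Set.ofList l) x := by
  rw [PySem.Set.ofList_eq_foldl, PySem.Set.ofList_eq_foldl, List.foldl_append]
  rfl

theorem pv_add_of_mem {α : Type} [BEq α] [LawfulBEq α] [DecidableEq α] (s : PySem.Set α) (x : α) (h : x ∈ s) :
    PySem.Set.add s x = s := by
  show (if s.contains x then s else s ++ [x]) = s
  rw [PySem.Set.contains_eq_decide, if_pos (by simpa using h)]

theorem pv_add_of_not_mem {α : Type} [BEq α] [LawfulBEq α] [DecidableEq α] (s : PySem.Set α) (x : α) (h : x ∉ s) :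
    PySem.Set.add s x = s ++ [x] := by
  show (if s.contains x then s else s ++ [x]) = s ++ [x]
  rw [PySem.Set.contains_eq_decide, if_neg (by simpa using h)]

theorem pv_flatMap_single {α : Type} (os : List Int) (o : Int) (v : List α)
    (hnd : os.Nodup) (ho : o ∈ os) :
    os.flatMap (fun o' => if o' = o then v else []) = v := by
  induction os with
  | nil => cases ho
  | cons a t ih =>
    rw [List.nodup_cons] at hnd
    by_cases hao : a = o
    · have hT : t.flatMap (fun o' => if o' = o then v else []) = [] := by
        rw [List.flatMap_eq_nil_iff]
        intro b hb
        rw [if_neg]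
        intro he2
        exact hnd.1 (by rw [hao, ← he2]; exact hb)
      simp only [List.flatMap_cons, if_pos hao, hT, List.append_nil]
    · have ho' : o ∈ t := by
        rcases List.mem_cons.mp ho with he | ht
        · exact absurd he.symm hao
        · exact ht
      simp only [List.flatMap_cons, if_neg hao, List.nil_append]
      exact ih hnd.2 ho'

-- CHARACTERISATION: a stable sort by (onset, pitch) is the concatenation, over the
-- increasing distinct onsets, of the onset groups each stably sorted by pitch
theorem pv_char (xs : List (List (String × Int))) :
    PySem.List.sorted2 xs alignB_onset alignB_pitch false =
      (pvOns xs).flatMap (fun o => pvB xs o) := by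
  induction xs using List.reverseRecOn with
  | nil => rfl
  | append_singleton l x ih =>
    have hfold : PySem.List.sorted2 (l ++ [x]) alignB_onset alignB_pitch false
        = PySem.List.insertBy (pvLt alignB_onset alignB_pitch) x
            (PySem.List.sorted2 l alignB_onset alignB_pitch false) := by
      rw [pv_sorted2_eq, pv_sorted2_eq, List.foldl_append]; rfl
    have hso : (pvOns l).Pairwise (· < ·) := PySem.List.sorted_ofList_pairwise_lt _
    have hB : ∀ o ∈ pvOns l, ∀ y ∈ pvB l o, alignB_onset y = o :=
      fun o _ y hy => pv_pvB_onset l o y hy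
    rw [hfold, ih]
    by_cases hx : alignB_onset x ∈ l.map alignB_onset
    · have hmem : alignB_onset x ∈ pvOns l := (pv_mem_pvOns l _).mpr hx
      rw [pv_ins1 x (pvB l) (pvOns l) hso hB hmem]
      have hons : pvOns (l ++ [x]) = pvOns l := by
        unfold pvOns
        rw [List.map_append]
        simp only [List.map_cons, List.map_nil]
        rw [pv_ofList_append_one, pv_add_of_mem _ _ ((PySem.Set.mem_ofList _ _).mpr hx)]
      rw [hons]
      refine (List.flatMap_congr (fun o ho => ?_)).symm
      by_cases ho0 : o = alignB_onset x
      · rw [if_pos ho0]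
        have hGa : pvG (l ++ [x]) o = pvG l o ++ [x] := by
          unfold pvG
          rw [List.filter_append]
          simp [ho0]
        unfold pvB
        rw [hGa, pv_sorted_append_one]
        refine (pv_insertBy_congr _ _ x _ (fun y hy => ?_)).symm
        exact pv_lt_eq x y ((pv_pvB_onset l o y hy ▸ ho0).symm)
      · rw [if_neg ho0]
        unfold pvB pvG
        rw [List.filter_append]
        have hbe : (alignB_onset x == o) = false := by
          rw [beq_eq_false_iff_ne]
          exact fun he => ho0 he.symm
        rw [List.filter_cons, List.filter_nil]
        simp only [hbe, Bool.false_eq_true, if_false, List.append_nil]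
    · have hnot : alignB_onset x ∉ pvOns l := fun h => hx ((pv_mem_pvOns l _).mp h)
      have hne : ∀ o ∈ pvOns l, pvB l o ≠ [] := fun o ho => pv_pvB_ne_nil l o ho
      rw [pv_ins2 x (pvB l) (pvOns l) hso hB hne hnot]
      have hons : pvOns (l ++ [x]) =
          PySem.List.insertBy (fun a b => decide (a < b)) (alignB_onset x) (pvOns l) := by
        unfold pvOns
        rw [List.map_append]
        simp only [List.map_cons, List.map_nil]
        rw [pv_ofList_append_one,
          pv_add_of_not_mem _ _ (by rw [PySem.Set.mem_ofList]; exact hx)]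
        exact pv_sorted_append_one _ _ _
      rw [hons]
      refine (List.flatMap_congr (fun o ho => ?_)).symm
      rw [PySem.List.mem_insertBy] at ho
      by_cases ho0 : o = alignB_onset x
      · rw [if_pos ho0]
        unfold pvB pvG
        rw [List.filter_append]
        have h1 : List.filter (fun n => alignB_onset n == o) l = [] := by
          rw [List.filter_eq_nil_iff]
          intro a ha hpa
          rw [beq_iff_eq] at hpa
          exact hx (List.mem_map.mpr ⟨a, ha, hpa.trans ho0⟩)
        have h2 : List.filter (fun n => alignB_onset n == o) [x] = [x] := by
          rw [List.filter_cons, List.filter_nil]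
          simp [ho0.symm]
        rw [h1, h2]
        rfl
      · rw [if_neg ho0]
        unfold pvB pvG
        rw [List.filter_append]
        have hnil : List.filter (fun n => alignB_onset n == o) [x] = [] := by
          rw [List.filter_cons, List.filter_nil]
          have hbe : (alignB_onset x == o) = false := by
            rw [beq_eq_false_iff_ne]
            exact fun he => ho0 he.symm
          simp [hbe]
        rw [hnil, List.append_nil]


-- value of the minimum depends only on membership
theorem pv_minD_eq (l1 l2 : List Int) (h1 : l1 ≠ []) (hm : ∀ a, a ∈ l1 ↔ a ∈ l2) :
    (PySem.List.min? l1 (fun x => x)).getD 0 = (PySem.List.min? l2 (fun x => x)).getD 0 := by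
  have h2 : l2 ≠ [] := by
    obtain ⟨a, ha⟩ := List.exists_mem_of_ne_nil l1 h1
    intro he; rw [he] at hm; exact absurd ((hm a).mp ha) (List.not_mem_nil)
  obtain ⟨m1, hm1⟩ : ∃ m, PySem.List.min? l1 (fun x => x) = some m := by
    cases hc : PySem.List.min? l1 (fun x => x) with
    | none => exact absurd ((PySem.List.min?_eq_none_iff _ _).mp hc) h1
    | some m => exact ⟨m, rfl⟩
  obtain ⟨m2, hm2⟩ : ∃ m, PySem.List.min? l2 (fun x => x) = some m := by
    cases hc : PySem.List.min? l2 (fun x => x) with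
    | none => exact absurd ((PySem.List.min?_eq_none_iff _ _).mp hc) h2
    | some m => exact ⟨m, rfl⟩
  rw [hm1, hm2]
  have ha := PySem.List.min?_isMin hm1 m2 ((hm m2).mpr (PySem.List.min?_mem hm2))
  have hb := PySem.List.min?_isMin hm2 m1 ((hm m1).mp (PySem.List.min?_mem hm1))
  simp only [Option.getD_some]
  exact le_antisymm ha hb


theorem pv_setlen_eq (l1 l2 : List Int) (hm : ∀ a, a ∈ l1 ↔ a ∈ l2) :
    (PySem.Set.ofList l1).length = (PySem.Set.ofList l2).length := by
  refine List.Perm.length_eq ?_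
  refine (List.perm_ext_iff_of_nodup (PySem.Set.nodup_ofList l1) (PySem.Set.nodup_ofList l2)).mpr ?_
  intro a
  rw [PySem.Set.mem_ofList, PySem.Set.mem_ofList]
  exact hm a


-- F leaves the sort keys unchanged
theorem pv_F_onset (xs : List (List (String × Int))) (n : List (String × Int)) :
    alignB_onset (pvF xs n) = alignB_onset n := by
  unfold pvF
  split
  · simp only [alignB_onset]
    exact PySem.Dict.getD_insert_of_ne _ _ _ (by decide)
  · rfl


theorem pv_F_pitch (xs : List (List (String × Int))) (n : List (String × Int)) :
    alignB_pitch (pvF xs n) = alignB_pitch n := by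
  unfold pvF
  split
  · simp only [alignB_pitch]
    exact PySem.Dict.getD_insert_of_ne _ _ _ (by decide)
  · rfl


-- B's run fix on the pitch-sorted group is the pointwise F
theorem pv_fixB_eq (xs : List (List (String × Int))) (o : Int) :
    alignB_fix (pvB xs o) = (pvB xs o).map (pvF xs) := by
  have ho : ∀ n ∈ pvB xs o, alignB_onset n = o := fun n hn => pv_pvB_onset xs o n hn
  have hlen : (pvB xs o).length = (pvG xs o).length := PySem.List.length_sorted _ _ _
  have hdm : ∀ a, a ∈ (pvB xs o).map alignB_dur ↔ a ∈ (pvG xs o).map alignB_dur := by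
    intro a
    simp only [List.mem_map]
    constructor <;> rintro ⟨n, hn, rfl⟩
    · exact ⟨n, (PySem.List.mem_sorted _ _ _ _).mp hn, rfl⟩
    · exact ⟨n, (PySem.List.mem_sorted _ _ _ _).mpr hn, rfl⟩
  have hsl : (PySem.Set.ofList ((pvB xs o).map alignB_dur)).length
      = (PySem.Set.ofList ((pvG xs o).map alignB_dur)).length :=
    pv_setlen_eq _ _ hdm
  by_cases h1 : 1 < (pvG xs o).length
  · by_cases h2 : 1 < (PySem.Set.ofList ((pvG xs o).map alignB_dur)).length
    · have hmin : (PySem.List.min? (PySem.Set.ofList ((pvB xs o).map alignB_dur)) (fun x => x)).getD 0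
          = pvMin (pvG xs o) := by
        unfold pvMin
        refine pv_minD_eq _ _ ?_ ?_
        · intro he
          rw [he] at hsl
          simp at hsl
          omega
        · intro a
          rw [PySem.Set.mem_ofList, PySem.Set.mem_ofList]
          exact hdm a
      simp only [alignB_fix]
      rw [if_pos (by omega), if_pos (by rw [hsl]; exact h2), hmin]
      refine List.map_congr_left (fun n hn => ?_)
      rw [pvF, ho n hn, if_pos ⟨h1, h2⟩]
    · simp only [alignB_fix]
      rw [if_pos (by omega), if_neg (by rw [hsl]; exact h2)]
      have hid : ∀ n ∈ pvB xs o, pvF xs n = n := by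
        intro n hn
        rw [pvF, ho n hn, if_neg (fun hc => h2 hc.2)]
      rw [List.map_congr_left hid]; simp
  · simp only [alignB_fix]
    rw [if_neg (by omega)]
    have hid : ∀ n ∈ pvB xs o, pvF xs n = n := by
      intro n hn
      rw [pvF, ho n hn, if_neg (fun hc => h1 hc.1)]
    rw [List.map_congr_left hid]; simp


-- A's chord-alignment body on the onset group is the pointwise F
theorem pv_fixA_eq (xs : List (List (String × Int))) (o : Int) :
    (if 1 < (pvG xs o).length then
       if 1 < (PySem.Set.ofList ((pvG xs o).map alignB_dur)).length then
         (pvG xs o).map (fun n => ((PySem.Dict.mk n).insert "offset"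
           (alignB_onset n + (PySem.List.min? ((pvG xs o).map alignB_dur) (fun x => x)).getD 0)).items)
       else pvG xs o
     else pvG xs o) = (pvG xs o).map (pvF xs) := by
  have ho : ∀ n ∈ pvG xs o, alignB_onset n = o := fun n hn => pv_onset_of_mem_pvG xs o n hn
  by_cases h1 : 1 < (pvG xs o).length
  · by_cases h2 : 1 < (PySem.Set.ofList ((pvG xs o).map alignB_dur)).length
    · have hnil : (pvG xs o).map alignB_dur ≠ [] := by
        intro he
        rw [he] at h2
        simp [PySem.Set.ofList] at h2
      have hmin : (PySem.List.min? ((pvG xs o).map alignB_dur) (fun x => x)).getD 0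
          = pvMin (pvG xs o) := by
        unfold pvMin
        refine pv_minD_eq _ _ hnil ?_
        intro a
        rw [PySem.Set.mem_ofList]
      rw [if_pos h1, if_pos h2, hmin]
      refine List.map_congr_left (fun n hn => ?_)
      rw [pvF, ho n hn, if_pos ⟨h1, h2⟩]
    · rw [if_pos h1, if_neg h2]
      have hid : ∀ n ∈ pvG xs o, pvF xs n = n := by
        intro n hn
        rw [pvF, ho n hn, if_neg (fun hc => h2 hc.2)]
      rw [List.map_congr_left hid]; simp
  · rw [if_neg h1]
    have hid : ∀ n ∈ pvG xs o, pvF xs n = n := by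
      intro n hn
      rw [pvF, ho n hn, if_neg (fun hc => h1 hc.1)]
    rw [List.map_congr_left hid]; simp


-- B's run walk over a concatenation of nonempty blocks of distinct increasing onsets
theorem pv_walk_blocks (Bf : Int → List (List (String × Int))) (os : List Int)
    (hso : os.Pairwise (· < ·))
    (hne : ∀ o ∈ os, Bf o ≠ [])
    (hB : ∀ o ∈ os, ∀ y ∈ Bf o, alignB_onset y = o) :
    alignB_walk (os.flatMap Bf) = os.flatMap (fun o => alignB_fix (Bf o)) := by
  induction os with
  | nil => simp [alignB_walk]
  | cons o0 os' ih =>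
    rw [List.pairwise_cons] at hso
    obtain ⟨n, t, hbf⟩ : ∃ n t, Bf o0 = n :: t := by
      cases hb : Bf o0 with
      | nil => exact absurd hb (hne o0 (by simp))
      | cons n t => exact ⟨n, t, rfl⟩
    have hn0 : alignB_onset n = o0 := hB o0 (by simp) n (by rw [hbf]; simp)
    have htT : ∀ y ∈ t, (alignB_onset y == alignB_onset n) = true := by
      intro y hy
      rw [beq_iff_eq, hn0]
      exact hB o0 (by simp) y (by rw [hbf]; simp [hy])
    have hrF : ∀ y ∈ os'.flatMap Bf, (alignB_onset y == alignB_onset n) = false := by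
      intro y hy
      rw [List.mem_flatMap] at hy
      obtain ⟨o, hom, hyo⟩ := hy
      rw [beq_eq_false_iff_ne, hn0, hB o (by simp [hom]) y hyo]
      exact ne_of_gt (hso.1 o hom)
    simp only [List.flatMap_cons, hbf, List.cons_append]
    rw [alignB_walk]
    rw [pv_takeWhile_all _ _ _ htT, pv_takeWhile_none _ _ hrF,
      pv_dropWhile_all _ _ _ htT, pv_dropWhile_none _ _ hrF, List.append_nil]
    rw [ih hso.2 (fun o hom => hne o (by simp [hom])) (fun o hom => hB o (by simp [hom]))]


-- A's grouped-and-aligned concatenation, before the final sort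
theorem pv_A_result (xs : List (List (String × Int))) :
    align_chord_durations_py xs =
      PySem.List.sorted2 (((pvOns xs).flatMap (fun o => pvG xs o)).map (pvF xs))
        alignB_onset alignB_pitch false := by
  simp only [align_chord_durations_py, pv_onset_def, pv_pitch_def, pv_dur_def]
  have hkeys : (xs.foldl (fun d note => d.modify (alignB_onset note) [] (fun g => g ++ [note]))
      PySem.Dict.empty).keys = PySem.Set.ofList (xs.map alignB_onset) := by
    rw [PySem.Dict.keys_foldl_modify_key xs alignB_onset [] (fun _ note g => g ++ [note])
      PySem.Dict.empty, PySem.Dict.keys_empty]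
    rw [PySem.Set.ofList_eq_foldl]
    rfl
  have hnd : (xs.foldl (fun d note => d.modify (alignB_onset note) [] (fun g => g ++ [note]))
      PySem.Dict.empty).keys.Nodup :=
    PySem.Dict.nodup_keys_foldl_modify_key xs alignB_onset [] (fun _ note g => g ++ [note])
      PySem.Dict.empty (by rw [PySem.Dict.keys_empty]; exact List.nodup_nil)
  have hg : ∀ o, (xs.foldl (fun d note => d.modify (alignB_onset note) [] (fun g => g ++ [note]))
      PySem.Dict.empty).getD o [] = pvG xs o := by
    intro o
    have h := PySem.Dict.getD_foldl_modify_append (xs.map (fun n => (alignB_onset n, n)))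
      PySem.Dict.empty o
    rw [List.foldl_map] at h
    simpa [pvG, List.filter_map, List.map_map, Function.comp_def] using h
  have hitems : (xs.foldl (fun d note => d.modify (alignB_onset note) [] (fun g => g ++ [note]))
      PySem.Dict.empty).items
      = (PySem.Set.ofList (xs.map alignB_onset)).map (fun o => (o, pvG xs o)) := by
    rw [PySem.Dict.items_eq_map_keys _ hnd []]
    rw [hkeys]
    exact List.map_congr_left (fun o _ => by rw [hg o])
  rw [hitems]
  have hsrt : PySem.List.sorted
      ((PySem.Set.ofList (xs.map alignB_onset)).map (fun o => (o, pvG xs o))) (fun p => p.1) false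
      = (pvOns xs).map (fun o => (o, pvG xs o)) := by
    unfold pvOns
    rw [PySem.List.sorted_eq_foldl_insertBy, PySem.List.sorted_eq_foldl_insertBy]
    exact pv_foldl_insertBy_map (fun o => (o, pvG xs o)) _ _ (fun a b => rfl) _ []
  rw [hsrt, PySem.List.foldl_append_eq_flatMap, List.nil_append, List.flatMap_map]
  congr 1
  rw [List.map_flatMap]
  refine List.flatMap_congr (fun o _ => ?_)
  exact pv_fixA_eq xs o


-- the regrouped list sorts to the same list as the original
theorem pv_sorted2_regroup (xs : List (List (String × Int))) :
    PySem.List.sorted2 ((pvOns xs).flatMap (fun o => pvG xs o)) alignB_onset alignB_pitch false =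
      PySem.List.sorted2 xs alignB_onset alignB_pitch false := by
  rw [pv_char ((pvOns xs).flatMap (fun o => pvG xs o)), pv_char xs]
  have hnd : (pvOns xs).Nodup :=
    (PySem.List.sorted_ofList_pairwise_lt _).imp (fun h => ne_of_lt h)
  have hmemLc : ∀ n, n ∈ (pvOns xs).flatMap (fun o => pvG xs o) ↔ n ∈ xs := by
    intro n
    rw [List.mem_flatMap]
    constructor
    · rintro ⟨o, _, hno⟩
      exact (List.mem_filter.mp hno).1
    · intro hn
      refine ⟨alignB_onset n, ?_, ?_⟩
      · rw [pv_mem_pvOns]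
        exact List.mem_map.mpr ⟨n, hn, rfl⟩
      · simp [pvG, List.mem_filter, hn]
  have hG : ∀ o ∈ pvOns xs, pvG ((pvOns xs).flatMap (fun o => pvG xs o)) o = pvG xs o := by
    intro o ho
    show List.filter _ _ = _
    rw [List.filter_flatMap]
    have hb : ∀ o' ∈ pvOns xs,
        List.filter (fun n => alignB_onset n == o) (pvG xs o')
          = if o' = o then pvG xs o else [] := by
      intro o' _
      by_cases he : o' = o
      · subst he
        rw [if_pos rfl]
        apply List.filter_eq_self.mpr
        intro a ha
        rw [beq_iff_eq]
        exact pv_onset_of_mem_pvG xs o' a ha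
      · rw [if_neg he, List.filter_eq_nil_iff]
        intro a ha hp
        rw [beq_iff_eq] at hp
        exact he ((pv_onset_of_mem_pvG xs o' a ha).symm.trans hp)
    rw [List.flatMap_congr hb]
    exact pv_flatMap_single _ o _ hnd ho
  have hons : pvOns ((pvOns xs).flatMap (fun o => pvG xs o)) = pvOns xs := by
    unfold pvOns
    refine PySem.List.sorted_eq_sorted_of_perm _ _ _ (fun a b h => h) ?_
    refine (List.perm_ext_iff_of_nodup (PySem.Set.nodup_ofList _) (PySem.Set.nodup_ofList _)).mpr ?_
    intro a
    rw [PySem.Set.mem_ofList, PySem.Set.mem_ofList, List.mem_map, List.mem_map]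
    constructor <;> rintro ⟨n, hn, rfl⟩
    · exact ⟨n, (hmemLc n).mp hn, rfl⟩
    · exact ⟨n, (hmemLc n).mpr hn, rfl⟩
  rw [hons]
  refine List.flatMap_congr (fun o ho => ?_)
  unfold pvB
  rw [hG o ho]


theorem pv_main (xs : List (List (String × Int))) :
    Spec_align_chord_durations_py xs (align_chord_durations_py xs) := by
  unfold Spec_align_chord_durations_py
  have hcomp : ∀ a b, pvLt alignB_onset alignB_pitch (pvF xs a) (pvF xs b)
      = pvLt alignB_onset alignB_pitch a b := by
    intro a b
    simp [pvLt, pv_F_onset, pv_F_pitch]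
  have hmapsort : PySem.List.sorted2
      (((pvOns xs).flatMap (fun o => pvG xs o)).map (pvF xs)) alignB_onset alignB_pitch false
      = (PySem.List.sorted2 ((pvOns xs).flatMap (fun o => pvG xs o))
          alignB_onset alignB_pitch false).map (pvF xs) := by
    rw [pv_sorted2_eq, pv_sorted2_eq]
    exact pv_foldl_insertBy_map (pvF xs) _ _ hcomp _ []
  rw [pv_A_result xs, hmapsort, pv_sorted2_regroup xs, pv_char xs]
  unfold align_chord_durations_py_alt
  rw [pv_char xs]
  rw [pv_walk_blocks (pvB xs) (pvOns xs) (PySem.List.sorted_ofList_pairwise_lt _)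
    (fun o ho => pv_pvB_ne_nil xs o ho) (fun o _ y hy => pv_pvB_onset xs o y hy)]
  rw [List.map_flatMap]
  exact List.flatMap_congr (fun o _ => (pv_fixB_eq xs o).symm)


-- ===== VERDICT (by name: the statement is the Claim_ definition above) =====
theorem align_chord_durations_py_spec : Claim_equal_align_chord_durations_py := by
  intro xs _ _; exact pv_main xs
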